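-- pv_equiv track=rewrite | github.com/mishdub/finalproject | Algo17.py | calculate_width_and_height
-- ===== SOURCE A (Python) =====
-- def calculate_width_and_height(coordinates):
--     if len(coordinates) < 2:
--         raise ValueError("A polygon must have at least 2 vertices to calculate width and height.")
--
--     # Initialize with the coordinates of the first vertex.
--     min_x, max_x = coordinates[0][0], coordinates[0][0]
--     min_y, max_y = coordinates[0][1], coordinates[0][1]
--
--     # Iterate through the remaining vertices to find the bounding box.
--     for x, y in coordinates:
--         min_x = min(min_x, x)
--         max_x = max(max_x, x)
--         min_y = min(min_y, y)
--         max_y = max(max_y, y)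
--
--     width = max_x - min_x
--     height = max_y - min_y
--
--     return min(width, height)
-- ===== SOURCE B (Python) =====
-- def calculate_width_and_height(coordinates):
--     if len(coordinates) < 2:
--         raise ValueError("A polygon must have at least 2 vertices to calculate width and height.")
--     xs = sorted(x for x, _ in coordinates)
--     ys = sorted(y for _, y in coordinates)
--     return min(xs[-1] - xs[0], ys[-1] - ys[0])
-- ===== Notes on version B (the rewrite author's own statement) =====
-- stated objective: alternative
-- what changed: Replaces the fused four-accumulator scan with sorting each coordinate axis and reading the extremes off the ends of the sorted lists.
import Mathlib
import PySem

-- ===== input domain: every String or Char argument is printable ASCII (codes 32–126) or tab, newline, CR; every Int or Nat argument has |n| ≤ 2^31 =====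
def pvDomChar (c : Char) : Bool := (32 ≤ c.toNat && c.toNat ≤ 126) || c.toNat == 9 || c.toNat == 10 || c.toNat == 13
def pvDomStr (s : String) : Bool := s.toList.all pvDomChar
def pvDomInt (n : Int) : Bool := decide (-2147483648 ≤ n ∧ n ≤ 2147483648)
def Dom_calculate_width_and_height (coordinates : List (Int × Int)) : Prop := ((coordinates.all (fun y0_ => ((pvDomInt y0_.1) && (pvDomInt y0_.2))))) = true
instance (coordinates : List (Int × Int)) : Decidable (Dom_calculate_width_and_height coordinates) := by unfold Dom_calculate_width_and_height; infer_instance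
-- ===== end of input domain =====

-- B replaces A's fused four-accumulator scan with sorting each coordinate axis and reading the extremes off the sorted ends (alternative algorithm, O(n log n)).


-- ===== PORT A =====
def calculate_width_and_height (coordinates : List (Int × Int)) : Int :=
  if coordinates.length < 2 then 0   -- Python raises ValueError here; excluded by Pre_
  else
    match coordinates with
    | [] => 0  -- unreachable under the guard
    | p0 :: _ =>
      let s := coordinates.foldl
        (fun (st : Int × Int × Int × Int) (p : Int × Int) =>
          (min st.1 p.1, max st.2.1 p.1, min st.2.2.1 p.2, max st.2.2.2 p.2))
        (p0.1, p0.1, p0.2, p0.2)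
      let width := s.2.1 - s.1
      let height := s.2.2.2 - s.2.2.1
      min width height

-- ===== PORT B =====
def calculate_width_and_height_alt (coordinates : List (Int × Int)) : Int :=
  if coordinates.length < 2 then 0   -- Python raises ValueError here; excluded by Pre_
  else
    let xs := PySem.List.sorted (coordinates.map (fun p => p.1)) (fun v => v) false
    let ys := PySem.List.sorted (coordinates.map (fun p => p.2)) (fun v => v) false
    match PySem.List.pyGet? xs (-1), PySem.List.pyGet? xs 0,
          PySem.List.pyGet? ys (-1), PySem.List.pyGet? ys 0 with
    | some xh, some xl, some yh, some yl => min (xh - xl) (yh - yl)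
    | _, _, _, _ => 0  -- unreachable: the sorted lists are nonempty under the guard

-- ===== PRECONDITION & SPEC =====
-- Pre_ excludes exactly the inputs (fewer than 2 points) on which A raises ValueError.
def Pre_calculate_width_and_height (coordinates : List (Int × Int)) : Prop :=
  2 ≤ coordinates.length
instance (coordinates : List (Int × Int)) : Decidable (Pre_calculate_width_and_height coordinates) := by unfold Pre_calculate_width_and_height; infer_instance
def pvWitness_calculate_width_and_height : (List (Int × Int)) := [(0, 3), (2, 1)]
def Spec_calculate_width_and_height (coordinates : List (Int × Int)) (out : Int) : Prop := out = calculate_width_and_height_alt coordinates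
instance (coordinates : List (Int × Int)) (out : Int) : Decidable (Spec_calculate_width_and_height coordinates out) := by unfold Spec_calculate_width_and_height; infer_instance

-- ===== CLAIM =====
def Claim_equal_calculate_width_and_height : Prop := ∀ (coordinates : List (Int × Int)), Dom_calculate_width_and_height coordinates → Pre_calculate_width_and_height coordinates → Spec_calculate_width_and_height coordinates (calculate_width_and_height coordinates)

-- ===== LEMMAS AND PROOFS =====

-- A's fused loop computes the four componentwise reductions.
theorem fold4_eq (l : List (Int × Int)) (a b c d : Int) :
    l.foldl
      (fun (st : Int × Int × Int × Int) (p : Int × Int) =>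
        (min st.1 p.1, max st.2.1 p.1, min st.2.2.1 p.2, max st.2.2.2 p.2))
      (a, b, c, d)
    = ((l.map (fun p => p.1)).foldl min a, (l.map (fun p => p.1)).foldl max b,
       (l.map (fun p => p.2)).foldl min c, (l.map (fun p => p.2)).foldl max d) := by
  induction l generalizing a b c d with
  | nil => rfl
  | cons p t ih => simp [List.foldl, ih]

theorem foldl_min_le_init (l : List Int) (a : Int) : l.foldl min a ≤ a := by
  induction l generalizing a with
  | nil => simp
  | cons x t ih => exact le_trans (ih (min a x)) (min_le_left a x)

theorem foldl_min_le_mem (l : List Int) (a y : Int) (hy : y ∈ l) : l.foldl min a ≤ y := by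
  induction l generalizing a with
  | nil => simp at hy
  | cons x t ih =>
    rcases List.mem_cons.mp hy with h | h
    · subst h; exact le_trans (foldl_min_le_init t (min a y)) (min_le_right a y)
    · exact ih (min a x) h

theorem foldl_min_mem (l : List Int) (a : Int) : l.foldl min a = a ∨ l.foldl min a ∈ l := by
  induction l generalizing a with
  | nil => simp
  | cons x t ih =>
    simp only [List.foldl_cons]
    rcases ih (min a x) with h | h
    · rcases le_total a x with hle | hle
      · left; rw [h, min_eq_left hle]
      · right; rw [h, min_eq_right hle]; simp
    · right; exact List.mem_cons_of_mem _ h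

theorem init_le_foldl_max (l : List Int) (a : Int) : a ≤ l.foldl max a := by
  induction l generalizing a with
  | nil => simp
  | cons x t ih => exact le_trans (le_max_left a x) (ih (max a x))

theorem mem_le_foldl_max (l : List Int) (a y : Int) (hy : y ∈ l) : y ≤ l.foldl max a := by
  induction l generalizing a with
  | nil => simp at hy
  | cons x t ih =>
    rcases List.mem_cons.mp hy with h | h
    · subst h; exact le_trans (le_max_right a y) (init_le_foldl_max t (max a y))
    · exact ih (max a x) h

theorem foldl_max_mem (l : List Int) (a : Int) : l.foldl max a = a ∨ l.foldl max a ∈ l := by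
  induction l generalizing a with
  | nil => simp
  | cons x t ih =>
    simp only [List.foldl_cons]
    rcases ih (max a x) with h | h
    · rcases le_total x a with hle | hle
      · left; rw [h, max_eq_left hle]
      · right; rw [h, max_eq_right hle]; simp
    · right; exact List.mem_cons_of_mem _ h

-- every element of a (≤)-pairwise list is ≤ its last element
theorem pairwise_le_getLast (s : List Int) (hp : s.Pairwise (· ≤ ·)) (y : Int) (hy : y ∈ s)
    (h : s ≠ []) : y ≤ s.getLast h := by
  induction s with
  | nil => simp at hy
  | cons x t ih =>
    rcases List.mem_cons.mp hy with hyx | hyt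
    · subst hyx
      cases t with
      | nil => simp [List.getLast]
      | cons z u =>
        have hz : y ≤ (z :: u).getLast (by simp) :=
          (List.pairwise_cons.mp hp).1 _ (List.getLast_mem _)
        simpa [List.getLast_cons] using hz
    · cases t with
      | nil => simp at hyt
      | cons z u =>
        have := ih (List.pairwise_cons.mp hp).2 hyt (by simp)
        simpa [List.getLast_cons] using this

-- the sorted list's head is A's folded min, its last is A's folded max (fold seeded at the list's own head)
theorem sorted_head_eq_foldl_min (x : Int) (xs : List Int) :
    (PySem.List.sorted (x :: xs) (fun v => v) false).head? = some ((x :: xs).foldl min x) := by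
  have hperm := PySem.List.sorted_perm (x :: xs) (fun v => v) false
  cases hs : PySem.List.sorted (x :: xs) (fun v => v) false with
  | nil =>
    have := (PySem.List.sorted_eq_nil_iff (xs := x :: xs) (key := fun v => v) (rev := false)).mp hs
    simp at this
  | cons m t =>
    have hmem : m ∈ x :: xs := (hs ▸ hperm).mem_iff.mp (by simp)
    have hle : ∀ y ∈ x :: xs, m ≤ y := by
      intro y hy
      simpa using PySem.List.key_head_sorted_le (xs := x :: xs) (key := fun v => v) (m := m) (t := t) hs y hy
    have h1 : (x :: xs).foldl min x ≤ m := foldl_min_le_mem _ _ _ hmem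
    have h2 : m ≤ (x :: xs).foldl min x := by
      rcases foldl_min_mem (x :: xs) x with h | h
      · rw [h]; exact hle x (by simp)
      · exact hle _ h
    simp [le_antisymm h1 h2]

theorem sorted_getLast_eq_foldl_max (x : Int) (xs : List Int)
    (h : PySem.List.sorted (x :: xs) (fun v => v) false ≠ []) :
    (PySem.List.sorted (x :: xs) (fun v => v) false).getLast h = (x :: xs).foldl max x := by
  have hperm := PySem.List.sorted_perm (x :: xs) (fun v => v) false
  have hpw : (PySem.List.sorted (x :: xs) (fun v => v) false).Pairwise (· ≤ ·) := by
    simpa using PySem.List.sorted_pairwise (xs := x :: xs) (key := fun v => v)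
  set s := PySem.List.sorted (x :: xs) (fun v => v) false with hsdef
  have hlastmem : s.getLast h ∈ x :: xs := hperm.mem_iff.mp (List.getLast_mem h)
  have h1 : s.getLast h ≤ (x :: xs).foldl max x := mem_le_foldl_max _ _ _ hlastmem
  have h2 : (x :: xs).foldl max x ≤ s.getLast h := by
    rcases foldl_max_mem (x :: xs) x with hc | hc
    · rw [hc]
      exact pairwise_le_getLast s hpw x (hperm.mem_iff.mpr (by simp)) h
    · exact pairwise_le_getLast s hpw _ (hperm.mem_iff.mpr hc) h
  exact le_antisymm h1 h2

-- ===== VERDICT =====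
theorem calculate_width_and_height_spec : Claim_equal_calculate_width_and_height := by
  intro coordinates _ hpre
  unfold Pre_calculate_width_and_height at hpre
  unfold Spec_calculate_width_and_height
  match coordinates, hpre with
  | p :: t, hpre =>
    unfold calculate_width_and_height calculate_width_and_height_alt
    have hguard : ¬ (p :: t).length < 2 := by omega
    have hne1 : PySem.List.sorted (p.1 :: t.map (fun q => q.1)) (fun v => v) false ≠ [] := by
      simp [Ne, PySem.List.sorted_eq_nil_iff]
    have hne2 : PySem.List.sorted (p.2 :: t.map (fun q => q.2)) (fun v => v) false ≠ [] := by
      simp [Ne, PySem.List.sorted_eq_nil_iff]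
    have hx0 := sorted_head_eq_foldl_min p.1 (t.map (fun q => q.1))
    have hy0 := sorted_head_eq_foldl_min p.2 (t.map (fun q => q.2))
    have hx1 : (PySem.List.sorted (p.1 :: t.map (fun q => q.1)) (fun v => v) false).getLast? =
        some ((p.1 :: t.map (fun q => q.1)).foldl max p.1) := by
      rw [List.getLast?_eq_some_getLast hne1, sorted_getLast_eq_foldl_max]
    have hy1 : (PySem.List.sorted (p.2 :: t.map (fun q => q.2)) (fun v => v) false).getLast? =
        some ((p.2 :: t.map (fun q => q.2)).foldl max p.2) := by
      rw [List.getLast?_eq_some_getLast hne2, sorted_getLast_eq_foldl_max]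
    simp only [hguard, if_false, fold4_eq, List.map_cons,
      PySem.List.pyGet?_neg_one, PySem.List.pyGet?_zero]
    simp only [← List.head?_eq_getElem?]
    rw [hx0, hy0, hx1, hy1]
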